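-- pv_equiv track=rewrite | github.com/stokworks/AdventOfCode | days/day2015_05.py | part2
-- ===== SOURCE A (Python) =====
-- def part2(input_data):
--     n_nice = 0
--     for line in input_data:
--         last_pair = None
--         pairs = set()
--         has_double_pair = False
--         has_3_palindrome = False
--
--         for i in range(len(line)):
--             if not has_double_pair and i < len(line) - 1:
--                 pair = line[i:i + 2]
--                 if pair in pairs:
--                     has_double_pair = True
--                 if last_pair is not None:
--                     pairs.add(last_pair)
--                 last_pair = pair
--
--             if not has_3_palindrome and i < len(line) - 2 and line[i] == line[i + 2]:
--                 has_3_palindrome = True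
--
--         n_nice += 1 if has_double_pair and has_3_palindrome else 0
--
--     yield n_nice
-- ===== SOURCE B (Python) =====
-- def part2(input_data):
--     n_nice = 0
--     for line in input_data:
--         has_pair = any(line[i:i + 2] in line[i + 2:] for i in range(len(line) - 1))
--         has_pal = any(line[i] == line[i + 2] for i in range(len(line) - 2))
--         if has_pair and has_pal:
--             n_nice += 1
--     yield n_nice
-- ===== Notes on version B (the rewrite author's own statement) =====
-- stated objective: simpler
-- what changed: A's single fused pass per line with a delayed-add set of seen pairs and two sticky flags is replaced by two independent short scans: any() over substring containment of line[i:i+2] in line[i+2:] for the non-overlapping pair, and any() over line[i]==line[i+2] for the palindrome.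
import Mathlib
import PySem

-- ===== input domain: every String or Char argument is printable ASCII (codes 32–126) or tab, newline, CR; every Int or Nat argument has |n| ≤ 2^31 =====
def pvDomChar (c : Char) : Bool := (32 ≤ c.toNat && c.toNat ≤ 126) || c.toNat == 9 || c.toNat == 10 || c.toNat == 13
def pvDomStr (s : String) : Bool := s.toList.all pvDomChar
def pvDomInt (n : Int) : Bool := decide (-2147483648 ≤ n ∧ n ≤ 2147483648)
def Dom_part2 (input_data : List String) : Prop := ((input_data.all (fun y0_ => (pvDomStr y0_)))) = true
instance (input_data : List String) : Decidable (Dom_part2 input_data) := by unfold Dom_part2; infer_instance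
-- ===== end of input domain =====

-- B replaces A's single fused pass (delayed-add pair set + flags) by two independent
-- any-scans per line using substring containment; objective: simpler, no speed claim.

-- ===== PORT A =====
-- the state of A's inner loop: (last_pair, pairs, has_double_pair, has_3_palindrome)
abbrev StA := Option (List Char) × PySem.Set (List Char) × Bool × Bool

def stepA (cs : List Char) (st : StA) (i : Nat) : StA :=
  match st with
  | (lastPair, pairs, hdp, hp) =>
    let pst : Option (List Char) × PySem.Set (List Char) × Bool :=
      if !hdp && decide ((i : Int) < (cs.length : Int) - 1) then
        let pair := PySem.List.slice cs (some (i : Int)) (some ((i : Int) + 2))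
        let hdp2 := if PySem.Set.contains pairs pair then true else hdp
        let pairs2 := match lastPair with
          | some lp => PySem.Set.add pairs lp
          | none => pairs
        (some pair, pairs2, hdp2)
      else (lastPair, pairs, hdp)
    let hp2 := if !hp && decide ((i : Int) < (cs.length : Int) - 2) &&
        (PySem.List.pyGet? cs (i : Int) == PySem.List.pyGet? cs ((i : Int) + 2)) then true else hp
    (pst.1, pst.2.1, pst.2.2, hp2)

def lineA (cs : List Char) : StA :=
  (List.range cs.length).foldl (stepA cs) (none, PySem.Set.empty, false, false)

def part2 (input_data : List String) : List Int :=
  [input_data.foldl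
    (fun n line =>
      let st := lineA line.toList
      n + (if st.2.2.1 && st.2.2.2 then 1 else 0)) 0]

-- ===== PORT B =====
def hasPairB (cs : List Char) : Bool :=
  (List.range (cs.length - 1)).any (fun i =>
    PySem.Chars.isIn (PySem.List.slice cs (some (i : Int)) (some ((i : Int) + 2)))
      (PySem.List.slice cs (some ((i : Int) + 2)) none))

def hasPalB (cs : List Char) : Bool :=
  (List.range (cs.length - 2)).any (fun i =>
    PySem.List.pyGet? cs (i : Int) == PySem.List.pyGet? cs ((i : Int) + 2))

def part2_alt (input_data : List String) : List Int :=
  [input_data.foldl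
    (fun n line =>
      if hasPairB line.toList && hasPalB line.toList then n + 1 else n) 0]

-- ===== PRECONDITION & SPEC =====
def Spec_part2 (input_data : List String) (out : List Int) : Prop := out = part2_alt input_data
instance (input_data : List String) (out : List Int) : Decidable (Spec_part2 input_data out) := by unfold Spec_part2; infer_instance

-- ===== CLAIM (what is proved, stated in full; the proofs are below) =====
def Claim_equal_part2 : Prop := ∀ (input_data : List String), Dom_part2 input_data → Spec_part2 input_data (part2 input_data)

-- ===== LEMMAS AND PROOFS =====
def pairAt (cs : List Char) (i : Nat) : List Char := (cs.drop i).take 2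

def HdpSpec (cs : List Char) (k : Nat) : Prop :=
  ∃ j, j < k ∧ j + 1 < cs.length ∧ ∃ i, i + 2 ≤ j ∧ pairAt cs i = pairAt cs j

def HpSpec (cs : List Char) (k : Nat) : Prop :=
  ∃ i, i < k ∧ i + 2 < cs.length ∧ cs[i]? = cs[i + 2]?

theorem slice_eq_pairAt (cs : List Char) (i : Nat) :
    PySem.List.slice cs (some (i : Int)) (some ((i : Int) + 2)) = pairAt cs i := by
  have : ((i : Int) + 2) = (((i + 2 : Nat)) : Int) := by push_cast; ring
  rw [this, PySem.List.slice_natCast, pairAt]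
  congr 1
  omega

def foldA (cs : List Char) (k : Nat) : StA :=
  (List.range k).foldl (stepA cs) (none, PySem.Set.empty, false, false)

theorem stepA_true (cs : List Char) (lp : Option (List Char)) (ps : PySem.Set (List Char)) (hp : Bool) (k : Nat) :
    stepA cs (lp, ps, true, hp) k = (lp, ps, true,
      (if !hp && decide ((k : Int) < (cs.length : Int) - 2) &&
        (PySem.List.pyGet? cs (k : Int) == PySem.List.pyGet? cs ((k : Int) + 2)) then true else hp)) := by
  simp [stepA]

theorem stepA_false_in (cs : List Char) (lp : Option (List Char)) (ps : PySem.Set (List Char)) (hp : Bool) (k : Nat)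
    (h : k + 1 < cs.length) :
    stepA cs (lp, ps, false, hp) k =
      (some (PySem.List.slice cs (some (k : Int)) (some ((k : Int) + 2))),
       (match lp with | some l => PySem.Set.add ps l | none => ps),
       (if PySem.Set.contains ps (PySem.List.slice cs (some (k : Int)) (some ((k : Int) + 2))) then true else false),
      (if !hp && decide ((k : Int) < (cs.length : Int) - 2) &&
        (PySem.List.pyGet? cs (k : Int) == PySem.List.pyGet? cs ((k : Int) + 2)) then true else hp)) := by
  have hg : ((k : Int) < (cs.length : Int) - 1) := by omega
  simp [stepA, hg]

theorem stepA_false_out (cs : List Char) (lp : Option (List Char)) (ps : PySem.Set (List Char)) (hp : Bool) (k : Nat)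
    (h : ¬ (k + 1 < cs.length)) :
    stepA cs (lp, ps, false, hp) k = (lp, ps, false,
      (if !hp && decide ((k : Int) < (cs.length : Int) - 2) &&
        (PySem.List.pyGet? cs (k : Int) == PySem.List.pyGet? cs ((k : Int) + 2)) then true else hp)) := by
  have hg : ¬ ((k : Int) < (cs.length : Int) - 1) := by omega
  simp [stepA, hg]

theorem hpUpd_iff (cs : List Char) (hp : Bool) (k : Nat) :
    ((if !hp && decide ((k : Int) < (cs.length : Int) - 2) &&
        (PySem.List.pyGet? cs (k : Int) == PySem.List.pyGet? cs ((k : Int) + 2)) then true else hp) = true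
      ↔ (hp = true ∨ (k + 2 < cs.length ∧ cs[k]? = cs[k + 2]?))) := by
  have h2 : PySem.List.pyGet? cs ((k : Int) + 2) = cs[k + 2]? := by
    have hc : ((k : Int) + 2) = (((k + 2 : Nat)) : Int) := by push_cast; ring
    rw [hc, PySem.List.pyGet?_natCast]
  have hg2 : decide ((k : Int) < (cs.length : Int) - 2) = decide (k + 2 < cs.length) := by
    simp; omega
  rw [h2, hg2]
  cases hp <;> by_cases hg : k + 2 < cs.length <;>
    simp [PySem.List.pyGet?_natCast, hg]

theorem containsT_iff (ps : PySem.Set (List Char)) (x : List Char) :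
    PySem.Set.contains ps x = true ↔ x ∈ ps := by
  simp [PySem.Set.contains_eq_listContains]

theorem foldA_succ (cs : List Char) (k : Nat) :
    foldA cs (k + 1) = stepA cs (foldA cs k) k := by
  simp [foldA, List.range_succ]

theorem foldA_spec (cs : List Char) (k : Nat) (hk : k ≤ cs.length) :
    ((foldA cs k).2.2.1 = true ↔ HdpSpec cs k) ∧
    ((foldA cs k).2.2.2 = true ↔ HpSpec cs k) ∧
    ((foldA cs k).2.2.1 = false →
      (foldA cs k).1 =
        (if min k (cs.length - 1) = 0 then none else some (pairAt cs (min k (cs.length - 1) - 1))) ∧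
      ∀ p, p ∈ (foldA cs k).2.1 ↔
        ∃ i, i + 1 < min k (cs.length - 1) ∧ pairAt cs i = p) := by
  induction k with
  | zero =>
    refine ⟨by simp [foldA, HdpSpec], by simp [foldA, HpSpec], ?_⟩
    intro _
    exact ⟨by simp [foldA], by intro p; simp [foldA, PySem.Set.empty]⟩
  | succ k ih =>
    obtain ⟨ih1, ih2, ih3⟩ := ih (by omega)
    rw [foldA_succ]
    rcases hEq : foldA cs k with ⟨lp, ps, hdp, hp⟩
    rw [hEq] at ih1 ih2 ih3
    simp only at ih1 ih2 ih3
    have hpPart : ((if !hp && decide ((k : Int) < (cs.length : Int) - 2) &&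
        (PySem.List.pyGet? cs (k : Int) == PySem.List.pyGet? cs ((k : Int) + 2)) then true else hp) = true
        ↔ HpSpec cs (k + 1)) := by
      rw [hpUpd_iff, ih2]
      constructor
      · rintro (h | h)
        · obtain ⟨i, h1, h2, h3⟩ := h; exact ⟨i, by omega, h2, h3⟩
        · exact ⟨k, by omega, h.1, h.2⟩
      · rintro ⟨i, h1, h2, h3⟩
        by_cases hik : i < k
        · exact Or.inl ⟨i, hik, h2, h3⟩
        · have : i = k := by omega
          subst this; exact Or.inr ⟨h2, h3⟩
    cases hdp with
    | true =>
      rw [stepA_true]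
      refine ⟨?_, by simpa using hpPart, by intro h; exact absurd h (by simp)⟩
      constructor
      · intro _
        obtain ⟨j, h1, h2, h3⟩ := ih1.mp rfl
        exact ⟨j, by omega, h2, h3⟩
      · intro _; rfl
    | false =>
      have ihHdpF : ¬ HdpSpec cs k := fun h => by simpa using ih1.mpr h
      obtain ⟨ihLp, ihPs⟩ := ih3 rfl
      by_cases hin : k + 1 < cs.length
      · have hmink : min k (cs.length - 1) = k := by omega
        rw [hmink] at ihLp ihPs
        have hmink1 : min (k + 1) (cs.length - 1) = k + 1 := by omega
        rw [stepA_false_in cs lp ps hp k hin, slice_eq_pairAt]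
        refine ⟨?_, by simpa using hpPart, ?_⟩
        · -- hdp component
          constructor
          · intro h
            have hmem : pairAt cs k ∈ ps := by
              by_contra hmem
              simp only [Bool.ite_eq_true_distrib] at h
              rw [if_neg (fun hc => hmem ((containsT_iff ps _).mp hc))] at h
              exact Bool.false_ne_true h
            obtain ⟨i, hi1, hi2⟩ := (ihPs _).mp hmem
            exact ⟨k, by omega, by omega, i, by omega, hi2⟩
          · rintro ⟨j, hj1, hj2, i, hi1, hi2⟩
            have hjk : j = k := by
              by_contra hjk
              exact ihHdpF ⟨j, by omega, hj2, i, hi1, hi2⟩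
            subst hjk
            have hmem : pairAt cs j ∈ ps := (ihPs _).mpr ⟨i, by omega, hi2⟩
            simp
            exact hmem
        · -- lastPair and pairs, assuming new hdp = false
          intro hnew
          simp only [hmink1]
          refine ⟨by simp, ?_⟩
          intro p
          cases hlp : lp with
          | none =>
            have hk0 : k = 0 := by
              by_contra h0
              rw [if_neg (by omega), hlp] at ihLp
              exact absurd ihLp (by simp)
            subst hk0
            rw [ihPs p]
            constructor
            · rintro ⟨i, hi1, _⟩; omega
            · rintro ⟨i, hi1, _⟩; omega
          | some l =>
            have hkpos : 0 < k := by
              by_contra h0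
              rw [if_pos (by omega), hlp] at ihLp
              exact absurd ihLp (by simp)
            rw [if_neg (by omega)] at ihLp
            rw [hlp] at ihLp
            have hl : l = pairAt cs (k - 1) := by simpa using ihLp
            subst hl
            simp only [PySem.Set.mem_add, ihPs p]
            constructor
            · rintro (⟨i, hi1, hi2⟩ | h)
              · exact ⟨i, by omega, hi2⟩
              · exact ⟨k - 1, by omega, h.symm⟩
            · rintro ⟨i, hi1, hi2⟩
              by_cases hik : i + 1 < k
              · exact Or.inl ⟨i, hik, hi2⟩
              · have : i = k - 1 := by omega
                subst this; exact Or.inr hi2.symm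
      · have hmin : min (k + 1) (cs.length - 1) = min k (cs.length - 1) := by omega
        rw [stepA_false_out cs lp ps hp k hin]
        refine ⟨?_, by simpa using hpPart, ?_⟩
        · constructor
          · intro h; exact absurd h (by simp)
          · rintro ⟨j, hj1, hj2, rest⟩
            exact ((ihHdpF ⟨j, by omega, hj2, rest⟩)).elim
        · intro _
          rw [hmin]
          exact ⟨ihLp, ihPs⟩

theorem length_pairAt (cs : List Char) (i : Nat) (hi : i + 2 ≤ cs.length) :
    (pairAt cs i).length = 2 := by
  simp [pairAt]
  omega

theorem pair_prefix_iff (cs : List Char) (i m : Nat) (hi : i + 2 ≤ cs.length) :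
    (pairAt cs i <+: cs.drop m ↔ m + 2 ≤ cs.length ∧ pairAt cs m = pairAt cs i) := by
  constructor
  · intro h
    have hlen := h.length_le
    rw [length_pairAt cs i hi, List.length_drop] at hlen
    refine ⟨by omega, ?_⟩
    have := List.prefix_iff_eq_take.mp h
    rw [length_pairAt cs i hi] at this
    exact this.symm
  · rintro ⟨hm, hpm⟩
    rw [← hpm]
    exact List.take_prefix _ _

theorem slice_from_eq_drop (cs : List Char) (i : Nat) :
    PySem.List.slice cs (some ((i : Int) + 2)) none = cs.drop (i + 2) := by
  have hc : ((i : Int) + 2) = (((i + 2 : Nat)) : Int) := by push_cast; ring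
  rw [hc, PySem.List.slice_from_natCast]

theorem hasPairB_iff (cs : List Char) : hasPairB cs = true ↔ HdpSpec cs cs.length := by
  unfold hasPairB
  rw [List.any_eq_true]
  constructor
  · rintro ⟨i, hmem, hf⟩
    rw [List.mem_range] at hmem
    have hi2 : i + 2 ≤ cs.length := by omega
    rw [slice_eq_pairAt, slice_from_eq_drop] at hf
    obtain ⟨j, hpre⟩ := (PySem.Chars.exists_prefix_drop_iff_isIn _ _).mpr hf |>.imp (fun _ h => h)
    rw [List.drop_drop] at hpre
    obtain ⟨hm, hpm⟩ := (pair_prefix_iff cs i (i + 2 + j) hi2).mp hpre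
    exact ⟨i + 2 + j, by omega, by omega, i, by omega, hpm.symm⟩
  · rintro ⟨j, hj1, hj2, i, hi1, hpm⟩
    refine ⟨i, List.mem_range.mpr (by omega), ?_⟩
    rw [slice_eq_pairAt, slice_from_eq_drop]
    rw [← PySem.Chars.exists_prefix_drop_iff_isIn]
    refine ⟨j - i - 2, ?_⟩
    rw [List.drop_drop]
    have hj : i + 2 + (j - i - 2) = j := by omega
    rw [hj]
    exact (pair_prefix_iff cs i j (by omega)).mpr ⟨by omega, hpm.symm⟩

theorem hasPalB_iff (cs : List Char) : hasPalB cs = true ↔ HpSpec cs cs.length := by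
  unfold hasPalB
  rw [List.any_eq_true]
  have hget : ∀ i : Nat, (PySem.List.pyGet? cs (i : Int) == PySem.List.pyGet? cs ((i : Int) + 2)) = true
      ↔ cs[i]? = cs[i + 2]? := by
    intro i
    have hc : ((i : Int) + 2) = (((i + 2 : Nat)) : Int) := by push_cast; ring
    rw [hc, PySem.List.pyGet?_natCast, PySem.List.pyGet?_natCast, beq_iff_eq]
  constructor
  · rintro ⟨i, hmem, hf⟩
    rw [List.mem_range] at hmem
    exact ⟨i, by omega, by omega, (hget i).mp hf⟩
  · rintro ⟨i, h1, h2, h3⟩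
    exact ⟨i, List.mem_range.mpr (by omega), (hget i).mpr h3⟩

theorem lineNice_eq (cs : List Char) :
    ((lineA cs).2.2.1 && (lineA cs).2.2.2) = (hasPairB cs && hasPalB cs) := by
  have hA : lineA cs = foldA cs cs.length := rfl
  obtain ⟨h1, h2, _⟩ := foldA_spec cs cs.length le_rfl
  rw [hA]
  rw [Bool.eq_iff_iff]
  simp only [Bool.and_eq_true]
  rw [h1, h2, hasPairB_iff, hasPalB_iff]

theorem foldCount (l : List String) (n : Int) :
    l.foldl (fun n line =>
      let st := lineA line.toList
      n + (if st.2.2.1 && st.2.2.2 then 1 else 0)) n =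
    l.foldl (fun n line =>
      if hasPairB line.toList && hasPalB line.toList then n + 1 else n) n := by
  induction l generalizing n with
  | nil => rfl
  | cons x xs ih =>
    simp only [List.foldl_cons]
    rw [ih]
    congr 1
    rw [← lineNice_eq x.toList]
    cases h : ((lineA x.toList).2.2.1 && (lineA x.toList).2.2.2) <;> simp

-- ===== VERDICT (by name: the statement is the Claim_ definition above) =====
theorem part2_spec : Claim_equal_part2 := by
  intro input_data _
  show part2 input_data = part2_alt input_data
  unfold part2 part2_alt
  rw [foldCount]
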